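-- pv_equiv track=rewrite | github.com/hewett-hub/ArcPro | graphc/covid/admin/filters.py | most_recent_by_group
-- ===== SOURCE A (Python) =====
-- def most_recent_by_group(data, group_id_field, date_field):
--     """
--     Returns only the most recent entry for each group_id, indexed by group_id.
--     :param data: [{group_field: group_id, value_field: value, date_field: date},....]
--     :type data: list
--     :param group_id_field: The data field to be used as the group ids.
--     :type group_id_field: str
--     :param date_field: The data field containing the date values.
--     :type date_field: str
--     :return: {group_id: {group_field: group_id, value_field: value, date_field: date}}
--     :rtype: dict
--     """
--
--     result = {}
--     for item in data:
--         group_id = item[group_id_field]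
--         group_item = result.get(group_id, None)
--         if group_item:
--             if item[date_field] > group_item[date_field]:
--                 result[group_id] = item
--         else:
--             result[group_id] = item
--
--     return result
-- ===== SOURCE B (Python) =====
-- def most_recent_by_group(data, group_id_field, date_field):
--     """Group-then-reduce: one pass buckets items per group id, a second pass
--     reduces each bucket to its latest entry (strict >, first wins on ties)."""
--     groups = {}
--     for item in data:
--         groups.setdefault(item[group_id_field], []).append(item)
--
--     result = {}
--     for group_id, items in groups.items():
--         best = items[0]
--         for item in items[1:]:
--             if item[date_field] > best[date_field]:
--                 best = item
--         result[group_id] = best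
--     return result
-- ===== Notes on version B (the rewrite author's own statement) =====
-- stated objective: alternative
-- what changed: Single accumulate-best-while-scanning pass replaced by a two-phase decomposition: first bucket the items per group id (dict of lists), then reduce each bucket to its latest entry seeded with the first item.
import Mathlib
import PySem

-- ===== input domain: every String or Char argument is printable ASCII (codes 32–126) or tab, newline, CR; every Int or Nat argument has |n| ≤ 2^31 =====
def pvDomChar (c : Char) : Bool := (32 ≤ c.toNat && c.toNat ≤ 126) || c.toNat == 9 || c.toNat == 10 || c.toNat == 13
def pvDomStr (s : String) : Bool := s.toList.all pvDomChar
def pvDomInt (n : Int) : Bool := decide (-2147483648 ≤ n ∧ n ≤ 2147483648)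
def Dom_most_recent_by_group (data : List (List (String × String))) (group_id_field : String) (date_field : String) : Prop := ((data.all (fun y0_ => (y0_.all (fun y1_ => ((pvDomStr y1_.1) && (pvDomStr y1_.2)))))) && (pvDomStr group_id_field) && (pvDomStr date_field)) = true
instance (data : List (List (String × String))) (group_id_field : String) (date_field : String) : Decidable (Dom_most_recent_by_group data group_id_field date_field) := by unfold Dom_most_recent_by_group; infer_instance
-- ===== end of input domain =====

-- B replaces A's single accumulate-best pass by a two-phase decomposition (bucket per group id, then reduce each
-- bucket to its latest entry); same cost, no speed claim. Items (Python dicts) are modelled as association lists.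

-- item[k] — Python dict lookup (KeyError = none)
def itemGet? (item : List (String × String)) (k : String) : Option String :=
  (PySem.Dict.mk item).get? k

-- ===== PORT A =====
-- the body of A's for-loop: result.get(group_id, None); `if group_item:` (empty dict is falsy); strict > on dates
def aStep (group_id_field date_field : String)
    (res : PySem.Dict String (List (String × String))) (item : List (String × String)) :
    Option (PySem.Dict String (List (String × String))) :=
  match itemGet? item group_id_field with
  | none => none
  | some group_id =>
    match res.get? group_id with
    | some group_item =>
      if group_item.isEmpty = false then
        match itemGet? item date_field, itemGet? group_item date_field with
        | some d1, some d2 => if decide (d2 < d1) then some (res.insert group_id item) else some res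
        | _, _ => none
      else some (res.insert group_id item)
    | none => some (res.insert group_id item)

def most_recent_by_group (data : List (List (String × String))) (group_id_field : String) (date_field : String) : List (String × List (String × String)) :=
  ((data.foldl (fun acc item => acc.bind fun res => aStep group_id_field date_field res item)
      (some PySem.Dict.empty)).getD PySem.Dict.empty).items

-- ===== PORT B =====
-- phase 1: groups.setdefault(item[group_id_field], []).append(item)
def bGroupStep (group_id_field : String)
    (groups : PySem.Dict String (List (List (String × String)))) (item : List (String × String)) :
    Option (PySem.Dict String (List (List (String × String)))) :=
  match itemGet? item group_id_field with
  | none => none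
  | some gid => some (groups.modify gid [] (fun l => l ++ [item]))

-- one comparison of the reduce loop: item[date_field] > best[date_field]
def bReduceStep (date_field : String) (best item : List (String × String)) :
    Option (List (String × String)) :=
  match itemGet? item date_field, itemGet? best date_field with
  | some d1, some d2 => some (if decide (d2 < d1) then item else best)
  | _, _ => none

-- best = items[0]; for item in items[1:]: …
def bReduce (date_field : String) (first : List (String × String)) (rest : List (List (String × String))) :
    Option (List (String × String)) :=
  rest.foldl (fun acc item => acc.bind fun best => bReduceStep date_field best item) (some first)

-- phase 2 body: result[group_id] = best  (items[0] on an empty bucket would be an IndexError → none; buckets are never empty)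
def bResStep (date_field : String) (res : PySem.Dict String (List (String × String)))
    (p : String × List (List (String × String))) :
    Option (PySem.Dict String (List (String × String))) :=
  match p.2 with
  | [] => none
  | first :: rest => (bReduce date_field first rest).map fun best => res.insert p.1 best

def most_recent_by_group_alt (data : List (List (String × String))) (group_id_field : String) (date_field : String) : List (String × List (String × String)) :=
  (((data.foldl (fun acc item => acc.bind fun g => bGroupStep group_id_field g item)
        (some PySem.Dict.empty)).bind
      (fun groups => groups.items.foldl (fun acc p => acc.bind fun res => bResStep date_field res p)
        (some PySem.Dict.empty))).getD PySem.Dict.empty).items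

-- ===== PRECONDITION & SPEC =====
-- Pre_ = exactly the inputs where A returns: every item has the group-id key, and any two items of the same
-- group id both carry the date key (otherwise A's comparison raises KeyError).
def Pre_most_recent_by_group (data : List (List (String × String))) (group_id_field : String) (date_field : String) : Prop :=
  (∀ item ∈ data, (itemGet? item group_id_field).isSome = true) ∧
  data.Pairwise (fun a b =>
    (PySem.Dict.mk a).getD group_id_field "" = (PySem.Dict.mk b).getD group_id_field "" →
      (itemGet? a date_field).isSome = true ∧ (itemGet? b date_field).isSome = true)

instance (data : List (List (String × String))) (group_id_field : String) (date_field : String) : Decidable (Pre_most_recent_by_group data group_id_field date_field) := by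
  unfold Pre_most_recent_by_group; infer_instance

def pvWitness_most_recent_by_group : (List (List (String × String))) × String × String :=
  ([[("g", "a"), ("d", "1")], [("g", "b")], [("g", "a"), ("d", "2")]], "g", "d")

def Spec_most_recent_by_group (data : List (List (String × String))) (group_id_field : String) (date_field : String) (out : List (String × List (String × String))) : Prop := out = most_recent_by_group_alt data group_id_field date_field
instance (data : List (List (String × String))) (group_id_field : String) (date_field : String) (out : List (String × List (String × String))) : Decidable (Spec_most_recent_by_group data group_id_field date_field out) := by unfold Spec_most_recent_by_group; infer_instance

-- ===== CLAIM (what is proved, stated in full; the proofs are below) =====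
def Claim_equal_most_recent_by_group : Prop := ∀ (data : List (List (String × String))) (group_id_field : String) (date_field : String), Dom_most_recent_by_group data group_id_field date_field → Pre_most_recent_by_group data group_id_field date_field → Spec_most_recent_by_group data group_id_field date_field (most_recent_by_group data group_id_field date_field)

-- ===== LEMMAS AND PROOFS =====

-- total version of B's reduce loop (equal to bReduce when the date keys are present)
def reduceT (date_field : String) (first : List (String × String)) (rest : List (List (String × String))) :
    List (String × String) :=
  rest.foldl (fun best item =>
    if decide ((PySem.Dict.mk best).getD date_field "" < (PySem.Dict.mk item).getD date_field "") then item else best) first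

-- bucket → (group id, reduced best)
def Fred (date_field : String) (p : String × List (List (String × String))) :
    String × List (String × String) :=
  (p.1, match p.2 with | [] => [] | f :: r => reduceT date_field f r)

theorem reduceT_mem (df : String) (f : List (String × String)) (r : List (List (String × String))) :
    reduceT df f r ∈ f :: r := by
  induction r generalizing f with
  | nil => simp [reduceT]
  | cons x xs ih =>
    simp only [reduceT, List.foldl_cons]
    split
    · have := ih x; simp [reduceT] at this ⊢; tauto
    · have := ih f; simp [reduceT] at this ⊢; tauto

theorem bReduce_eq (df : String) (f : List (String × String)) (r : List (List (String × String)))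
    (h : ∀ it ∈ f :: r, (itemGet? it df).isSome = true) :
    bReduce df f r = some (reduceT df f r) := by
  induction r generalizing f with
  | nil => simp [bReduce, reduceT]
  | cons x xs ih =>
    have hf : (itemGet? f df).isSome := h f (by simp)
    have hx : (itemGet? x df).isSome := h x (by simp)
    obtain ⟨d2, hd2⟩ := Option.isSome_iff_exists.mp hf
    obtain ⟨d1, hd1⟩ := Option.isSome_iff_exists.mp hx
    have hstep : bReduceStep df f x = some (if decide (d2 < d1) then x else f) := by
      simp [bReduceStep, hd1, hd2]
    have hgd2 : (PySem.Dict.mk f).getD df "" = d2 := by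
      simp [PySem.Dict.getD_eq_get?_getD, itemGet? ] at hd2 ⊢; simp [hd2]
    have hgd1 : (PySem.Dict.mk x).getD df "" = d1 := by
      simp [PySem.Dict.getD_eq_get?_getD, itemGet? ] at hd1 ⊢; simp [hd1]
    simp only [bReduce, List.foldl_cons, Option.bind_some] at *
    rw [hstep]
    have hnext : ∀ it ∈ (if decide (d2 < d1) then x else f) :: xs, (itemGet? it df).isSome = true := by
      intro it hit
      rcases List.mem_cons.mp hit with h1 | h2
      · subst h1; split
        · exact hx
        · exact hf
      · exact h it (List.mem_cons_of_mem _ (List.mem_cons_of_mem _ h2))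
    have := ih _ hnext
    rw [this]
    simp only [reduceT, List.foldl_cons, hgd1, hgd2]

theorem phase2_eq (df : String) (ps : List (String × List (List (String × String))))
    (res : PySem.Dict String (List (String × String)))
    (h : ∀ p ∈ ps, p.2 ≠ [] ∧ (2 ≤ p.2.length → ∀ it ∈ p.2, (itemGet? it df).isSome = true)) :
    ps.foldl (fun acc p => acc.bind fun r => bResStep df r p) (some res)
      = some (ps.foldl (fun r p => r.insert p.1 (Fred df p).2) res) := by
  induction ps generalizing res with
  | nil => rfl
  | cons p ps ih =>
    obtain ⟨k, its⟩ := p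
    obtain ⟨hne, hdates⟩ := h (k, its) (by simp)
    obtain ⟨f, r, rfl⟩ : ∃ f r, its = f :: r := by
      cases hp : its with
      | nil => exact absurd hp hne
      | cons a b => exact ⟨a, b, rfl⟩
    have hred : bReduce df f r = some (reduceT df f r) := by
      cases r with
      | nil => simp [bReduce, reduceT]
      | cons x xs => exact bReduce_eq df f (x :: xs) (by intro it hit; exact hdates (by simp) it hit)
    simp only [List.foldl_cons, Option.bind_some]
    rw [show bResStep df res (k, f :: r) = some (res.insert k (reduceT df f r)) from by
      simp [bResStep, hred]]
    rw [ih _ (fun q hq => h q (by simp [hq]))]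
    rfl

-- uniqueness of the bucket stored at a key
theorem value_eq_of_mem_items {κ ν : Type} [BEq κ] [LawfulBEq κ]
    (d : PySem.Dict κ ν) (hnd : d.keys.Nodup) {k : κ} {v w : ν}
    (hv : (k, v) ∈ d.items) (hw : (k, w) ∈ d.items) : v = w := by
  have h1 := PySem.Dict.get?_of_mem_items d hv hnd
  have h2 := PySem.Dict.get?_of_mem_items d hw hnd
  rw [h1] at h2; exact (Option.some_inj.mp h2)

-- the coupled loop invariant: running A's loop and B's grouping loop side by side
theorem coupled (gf df : String) (l : List (List (String × String)))
    (grp : PySem.Dict String (List (List (String × String))))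
    (res : PySem.Dict String (List (String × String)))
    (hnodup : grp.keys.Nodup)
    (hkeys : res.keys = grp.keys)
    (hres : res.items = grp.items.map (Fred df))
    (hgood : ∀ p ∈ grp.items, p.2 ≠ [] ∧ ∀ it ∈ p.2, itemGet? it gf = some p.1)
    (hbuck : ∀ p ∈ grp.items, 2 ≤ p.2.length → ∀ it ∈ p.2, (itemGet? it df).isSome = true)
    (hcross : ∀ p ∈ grp.items, ∀ x ∈ l, (PySem.Dict.mk x).getD gf "" = p.1 →
        (∀ it ∈ p.2, (itemGet? it df).isSome = true) ∧ (itemGet? x df).isSome = true)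
    (hgid : ∀ x ∈ l, (itemGet? x gf).isSome = true)
    (hpw : l.Pairwise (fun a b =>
      (PySem.Dict.mk a).getD gf "" = (PySem.Dict.mk b).getD gf "" →
        (itemGet? a df).isSome = true ∧ (itemGet? b df).isSome = true)) :
    ∃ grp' res',
      l.foldl (fun acc item => acc.bind fun g => bGroupStep gf g item) (some grp) = some grp' ∧
      l.foldl (fun acc item => acc.bind fun r => aStep gf df r item) (some res) = some res' ∧
      grp'.keys.Nodup ∧
      res'.items = grp'.items.map (Fred df) ∧
      (∀ p ∈ grp'.items, p.2 ≠ [] ∧ (2 ≤ p.2.length → ∀ it ∈ p.2, (itemGet? it df).isSome = true)) := by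
  induction l generalizing grp res with
  | nil =>
    exact ⟨grp, res, rfl, rfl, hnodup, hres, fun p hp => ⟨(hgood p hp).1, hbuck p hp⟩⟩
  | cons item l ih =>
    obtain ⟨g, hg⟩ := Option.isSome_iff_exists.mp (hgid item (by simp))
    have hgetD : (PySem.Dict.mk item).getD gf "" = g := by
      rw [PySem.Dict.getD_eq_get?_getD]
      simp only [itemGet?] at hg
      simp [hg]
    obtain ⟨hQ, hpw'⟩ := List.pairwise_cons.mp hpw
    have hgid' : ∀ x ∈ l, (itemGet? x gf).isSome = true := fun x hx => hgid x (by simp [hx])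
    cases hgr : grp.get? g with
    | none =>
      -- a brand-new group id: both sides append a fresh key
      have hgk : g ∉ grp.keys := (PySem.Dict.get?_eq_none_iff_not_mem_keys grp g).mp hgr
      have hresget : res.get? g = none :=
        (PySem.Dict.get?_eq_none_iff_not_mem_keys res g).mpr (by rw [hkeys]; exact hgk)
      have hcg : grp.contains g = false := by
        rw [PySem.Dict.contains_eq_isSome_get?, hgr]; rfl
      have hcr : res.contains g = false := by
        rw [PySem.Dict.contains_eq_isSome_get?, hresget]; rfl
      have hbstep : bGroupStep gf grp item = some (grp.insert g [item]) := by
        simp [bGroupStep, hg, PySem.Dict.modify, PySem.Dict.getD_of_not_contains _ _ hcg]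
      have hastep : aStep gf df res item = some (res.insert g item) := by
        simp [aStep, hg, hresget]
      have hni : (grp.insert g [item]).items = grp.items ++ [(g, [item])] :=
        PySem.Dict.items_insert_of_not_contains grp [item] hcg
      have hnk : (grp.insert g [item]).keys = grp.keys ++ [g] :=
        PySem.Dict.keys_insert_of_not_contains grp [item] hcg
      have hrk : (res.insert g item).keys = res.keys ++ [g] :=
        PySem.Dict.keys_insert_of_not_contains res item hcr
      obtain ⟨grp', res', e1, e2, rest⟩ := ih (grp.insert g [item]) (res.insert g item)
        (by rw [hnk]
            refine List.Nodup.append hnodup (List.nodup_singleton g) ?_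
            intro a ha hb
            rw [List.mem_singleton] at hb
            exact hgk (hb ▸ ha))
        (by rw [hrk, hnk, hkeys])
        (by rw [PySem.Dict.items_insert_of_not_contains res item hcr, hni]
            simp [hres, Fred, reduceT])
        (by rw [hni]; intro p hp
            rcases List.mem_append.mp hp with h1 | h2
            · exact hgood p h1
            · simp at h2; subst h2; exact ⟨by simp, by intro it hit; simp at hit; subst hit; exact hg⟩)
        (by rw [hni]; intro p hp
            rcases List.mem_append.mp hp with h1 | h2
            · exact hbuck p h1
            · simp at h2; subst h2; intro hlen; simp at hlen)
        (by rw [hni]; intro p hp x hx hxg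
            rcases List.mem_append.mp hp with h1 | h2
            · exact hcross p h1 x (by simp [hx]) hxg
            · simp at h2; subst h2
              have := hQ x hx (by rw [hgetD, hxg])
              exact ⟨by intro it hit; simp at hit; subst hit; exact this.1, this.2⟩)
        hgid' hpw'
      exact ⟨grp', res', by simpa [hbstep] using e1, by simpa [hastep] using e2, rest⟩
    | some its =>
      -- an existing group: B appends to the bucket, A compares dates with the stored best
      have hmem : (g, its) ∈ grp.items := PySem.Dict.mem_items_of_get?_eq_some grp hgr
      obtain ⟨hits_ne, hits_gid⟩ := hgood (g, its) hmem
      obtain ⟨f, r, rfl⟩ : ∃ f r, its = f :: r := by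
        cases hp : its with
        | nil => exact absurd hp hits_ne
        | cons a b => exact ⟨a, b, rfl⟩
      have hbestmem : reduceT df f r ∈ f :: r := reduceT_mem df f r
      have hrnodup : res.keys.Nodup := by rw [hkeys]; exact hnodup
      have hresget : res.get? g = some (reduceT df f r) := by
        refine PySem.Dict.get?_of_mem_items res ?_ hrnodup
        rw [hres]
        exact List.mem_map.mpr ⟨(g, f :: r), hmem, rfl⟩
      have hbest_gid : itemGet? (reduceT df f r) gf = some g := hits_gid _ hbestmem
      have hbest_ne : (reduceT df f r).isEmpty = false := by
        cases hb : reduceT df f r with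
        | nil => rw [hb] at hbest_gid; simp [itemGet?, PySem.Dict.get?] at hbest_gid
        | cons a b => rfl
      obtain ⟨hallD, hitemD⟩ := hcross (g, f :: r) hmem item (by simp) hgetD
      obtain ⟨d1, hd1⟩ := Option.isSome_iff_exists.mp hitemD
      obtain ⟨d2, hd2⟩ := Option.isSome_iff_exists.mp (hallD _ hbestmem)
      have hcg : grp.contains g = true := by
        rw [PySem.Dict.contains_eq_isSome_get?, hgr]; rfl
      have hcr : res.contains g = true := by
        rw [PySem.Dict.contains_eq_isSome_get?, hresget]; rfl
      have hbstep : bGroupStep gf grp item = some (grp.insert g ((f :: r) ++ [item])) := by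
        simp [bGroupStep, hg, PySem.Dict.modify, PySem.Dict.getD_of_get?_eq_some _ _ hgr]
      have hastep : aStep gf df res item
          = some (if decide (d2 < d1) then res.insert g item else res) := by
        simp only [aStep, hg, hresget, hbest_ne, hd1, hd2, if_true]
        split <;> rfl
      -- the reduced value of the grown bucket
      have hg2 : (PySem.Dict.mk (reduceT df f r)).getD df "" = d2 := by
        rw [PySem.Dict.getD_eq_get?_getD]; simp only [itemGet?] at hd2; simp [hd2]
      have hg1 : (PySem.Dict.mk item).getD df "" = d1 := by
        rw [PySem.Dict.getD_eq_get?_getD]; simp only [itemGet?] at hd1; simp [hd1]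
      have hredapp : reduceT df f (r ++ [item])
          = if decide ((PySem.Dict.mk (reduceT df f r)).getD df ""
              < (PySem.Dict.mk item).getD df "") then item else reduceT df f r := by
        simp only [reduceT, List.foldl_append, List.foldl_cons, List.foldl_nil]
        rfl
      have hFred_app : Fred df (g, (f :: r) ++ [item])
          = (g, if decide (d2 < d1) then item else reduceT df f r) := by
        show (g, reduceT df f (r ++ [item])) = _
        rw [hredapp, hg1, hg2]
      have huniq : ∀ p ∈ grp.items, p.1 = g → p.2 = f :: r := by
        intro p hp hpg
        refine value_eq_of_mem_items grp hnodup ?_ hmem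
        rw [← hpg]; simpa using hp
      have hni : (grp.insert g ((f :: r) ++ [item])).items
          = grp.items.map (fun p => if p.1 == g then (g, (f :: r) ++ [item]) else p) :=
        PySem.Dict.items_insert_of_contains grp _ hcg
      have hnk : (grp.insert g ((f :: r) ++ [item])).keys = grp.keys :=
        PySem.Dict.keys_insert_of_contains grp _ hcg
      -- A's new dict (in both branches) has the same items as res patched at g
      have hresitems : (if decide (d2 < d1) then res.insert g item else res).items
          = (grp.insert g ((f :: r) ++ [item])).items.map (Fred df) := by
        rw [hni, List.map_map]
        have hpt : ∀ p ∈ grp.items,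
            ((Fred df) ∘ fun p => if p.1 == g then (g, (f :: r) ++ [item]) else p) p
              = (if decide (d2 < d1)
                  then (fun q => if q.1 == g then (g, item) else q)
                  else id) (Fred df p) := by
          intro p hp
          by_cases hpg : p.1 = g
          · have hp2 : p.2 = f :: r := huniq p hp hpg
            have hFp : Fred df p = (g, reduceT df f r) := by
              obtain ⟨a, b⟩ := p
              simp only at hpg hp2
              subst hpg; subst hp2
              rfl
            simp only [Function.comp, hpg, beq_self_eq_true, if_true, hFred_app, hFp]
            split <;> simp
          · have hbeq : (p.1 == g) = false := by simp [hpg]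
            have hfst : (Fred df p).1 = p.1 := rfl
            simp only [Function.comp, hbeq, Bool.false_eq_true, if_false]
            split
            · simp [hfst, hpg]
            · rfl
        rw [List.map_congr_left hpt]
        split
        · rw [PySem.Dict.items_insert_of_contains res item hcr, hres, List.map_map]
          rfl
        · rw [hres]
          simp
      have hnewgood : ∀ p ∈ (grp.insert g ((f :: r) ++ [item])).items,
          (p.2 ≠ [] ∧ ∀ it ∈ p.2, itemGet? it gf = some p.1) := by
        rw [hni]; intro p hp
        obtain ⟨q, hq, rfl⟩ := List.mem_map.mp hp
        by_cases hpg : q.1 = g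
        · simp only [hpg, beq_self_eq_true, if_true]
          refine ⟨by simp, ?_⟩
          intro it hit
          rcases List.mem_append.mp hit with h1 | h2
          · exact hits_gid it h1
          · simp at h2; subst h2; exact hg
        · simp only [beq_eq_false_iff_ne.mpr hpg]
          exact hgood q hq
      have hnewbuck : ∀ p ∈ (grp.insert g ((f :: r) ++ [item])).items,
          2 ≤ p.2.length → ∀ it ∈ p.2, (itemGet? it df).isSome = true := by
        rw [hni]; intro p hp
        obtain ⟨q, hq, rfl⟩ := List.mem_map.mp hp
        by_cases hpg : q.1 = g
        · simp only [hpg, beq_self_eq_true, if_true]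
          intro _ it hit
          rcases List.mem_append.mp hit with h1 | h2
          · exact hallD it h1
          · simp at h2; subst h2; exact hitemD
        · simp only [beq_eq_false_iff_ne.mpr hpg]
          exact hbuck q hq
      obtain ⟨grp', res', e1, e2, rest⟩ := ih (grp.insert g ((f :: r) ++ [item]))
        (if decide (d2 < d1) then res.insert g item else res)
        (by rw [hnk]; exact hnodup)
        (by rw [hnk, ← hkeys]; split
            · exact PySem.Dict.keys_insert_of_contains res item hcr
            · rfl)
        hresitems
        hnewgood
        hnewbuck
        (by rw [hni]; intro p hp x hx hxg
            obtain ⟨q, hq, rfl⟩ := List.mem_map.mp hp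
            by_cases hpg : q.1 = g
            · simp only [hpg, beq_self_eq_true, if_true] at hxg ⊢
              refine ⟨?_, (hcross (g, f :: r) hmem x (by simp [hx]) hxg).2⟩
              intro it hit
              rcases List.mem_append.mp hit with h1 | h2
              · exact hallD it h1
              · simp at h2; subst h2; exact hitemD
            · simp only [beq_eq_false_iff_ne.mpr hpg] at hxg ⊢
              exact hcross q hq x (by simp [hx]) hxg)
        hgid' hpw'
      exact ⟨grp', res', by simpa [hbstep] using e1, by simpa [hastep] using e2, rest⟩

-- ===== VERDICT (by name: the statement is the Claim_ definition above) =====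
theorem most_recent_by_group_spec : Claim_equal_most_recent_by_group := by
  intro data gf df _ hpre
  unfold Spec_most_recent_by_group
  obtain ⟨hgid, hpw⟩ := hpre
  obtain ⟨grp', res', e1, e2, hnd', hres', hgood'⟩ :=
    coupled gf df data PySem.Dict.empty PySem.Dict.empty
      PySem.Dict.nodup_keys_empty rfl rfl
      (by intro p hp; simp [PySem.Dict.empty] at hp)
      (by intro p hp; simp [PySem.Dict.empty] at hp)
      (by intro p hp; simp [PySem.Dict.empty] at hp)
      hgid hpw
  unfold most_recent_by_group most_recent_by_group_alt
  rw [e1, e2]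
  simp only [Option.bind_some, Option.getD_some]
  rw [phase2_eq df grp'.items PySem.Dict.empty hgood']
  simp only [Option.getD_some]
  rw [PySem.Dict.items_foldl_insert_fresh grp'.items (fun p => p.1) (fun p => (Fred df p).2)
    PySem.Dict.empty (fun a _ => PySem.Dict.contains_empty a.1) hnd']
  rw [hres']
  rfl
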